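-- pv_equiv track=rewrite | github.com/jmunetong/algos-training | arrays/prefix_suffix_swap.py | prefix_suffix_swap
-- ===== SOURCE A (Python) =====
-- def prefix_suffix_swap(arr):
--
--     N = len(arr)
--     p_len = int(N/3)
--     # replace overlapping elements
--     i = 0
--     j = -p_len
--     while i < p_len:
--         arr[i], arr[j] = arr[j], arr[i]
--         i +=1
--         j +=1
--
--     k =0
--     while k < p_len:
--         arr[k], arr[p_len +k] =  arr[p_len +k], arr[k]
--         k+=1
--     return arr
-- ===== SOURCE B (Python) =====
-- def prefix_suffix_swap(arr):
--     N = len(arr)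
--     p = N // 3
--     arr[:] = arr[p:2 * p] + arr[N - p:] + arr[2 * p:N - p] + arr[:p]
--     return arr
-- ===== Notes on version B (the rewrite author's own statement) =====
-- stated objective: simpler
-- what changed: Replaces the two in-place while-loops of pairwise element swaps with a single slice-concatenation assigned back via arr[:], expressing the final block layout directly.
import Mathlib
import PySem

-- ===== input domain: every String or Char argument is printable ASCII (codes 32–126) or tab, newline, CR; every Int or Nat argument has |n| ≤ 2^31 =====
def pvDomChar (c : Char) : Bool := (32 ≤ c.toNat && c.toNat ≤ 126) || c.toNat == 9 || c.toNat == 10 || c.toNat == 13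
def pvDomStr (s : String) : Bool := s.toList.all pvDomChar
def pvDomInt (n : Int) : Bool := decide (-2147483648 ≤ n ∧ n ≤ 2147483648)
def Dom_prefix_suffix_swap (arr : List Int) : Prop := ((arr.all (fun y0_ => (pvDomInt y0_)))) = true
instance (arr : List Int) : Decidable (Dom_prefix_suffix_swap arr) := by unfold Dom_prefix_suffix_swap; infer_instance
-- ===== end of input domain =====

-- B replaces A's two in-place swap loops by one slice concatenation (simpler); both Pythons mutate
-- the argument list in place (A by element swaps, B by arr[:] = ...), the theorems here are about
-- the returned value.

-- ===== PORT A =====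
-- arr[i], arr[j] = arr[j], arr[i]: the right-hand pair is read first, then arr[i] is assigned,
-- then arr[j].  Exact while both indices are in range, which holds throughout A's loops.
def pySwapA (l : List Int) (i j : Int) : List Int :=
  let a := PySem.List.pyGetD l i 0
  let b := PySem.List.pyGetD l j 0
  PySem.List.pySetD (PySem.List.pySetD l i b) j a

-- first while loop: while i < p_len: swap arr[i], arr[j]; i += 1; j += 1
def psLoop1 (l : List Int) (p i j : Int) : List Int :=
  if i < p then psLoop1 (pySwapA l i j) p (i + 1) (j + 1) else l
termination_by (p - i).toNat

-- second while loop: while k < p_len: swap arr[k], arr[p_len + k]; k += 1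
def psLoop2 (l : List Int) (p k : Int) : List Int :=
  if k < p then psLoop2 (pySwapA l k (p + k)) p (k + 1) else l
termination_by (p - k).toNat

def prefix_suffix_swap (arr : List Int) : List Int :=
  let N : Int := arr.length
  let p_len : Int := PySem.Int.floordiv N 3  -- int(N/3): N ≥ 0, so this is floor division by 3
  psLoop2 (psLoop1 arr p_len 0 (-p_len)) p_len 0

-- ===== PORT B =====
def prefix_suffix_swap_alt (arr : List Int) : List Int :=
  let N : Int := arr.length
  let p : Int := PySem.Int.floordiv N 3
  PySem.List.slice arr (some p) (some (2 * p)) ++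
    PySem.List.slice arr (some (N - p)) none ++
    PySem.List.slice arr (some (2 * p)) (some (N - p)) ++
    PySem.List.slice arr none (some p)

-- ===== PRECONDITION & SPEC =====
def Spec_prefix_suffix_swap (arr : List Int) (out : List Int) : Prop := out = prefix_suffix_swap_alt arr
instance (arr : List Int) (out : List Int) : Decidable (Spec_prefix_suffix_swap arr out) := by unfold Spec_prefix_suffix_swap; infer_instance

-- ===== CLAIM (what is proved, stated in full; the proofs are below) =====
def Claim_equal_prefix_suffix_swap : Prop := ∀ (arr : List Int), Dom_prefix_suffix_swap arr → Spec_prefix_suffix_swap arr (prefix_suffix_swap arr)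

-- ===== LEMMAS AND PROOFS =====

theorem pv_getD_set (l : List Int) (a x : Nat) (v : Int) :
    (l.set a v).getD x 0 = if x = a ∧ a < l.length then v else l.getD x 0 := by
  simp only [List.getD_eq_getElem?_getD, List.getElem?_set]
  split_ifs with h1 h2 h3 h3 <;> simp_all <;> omega

theorem pv_pySetD_neg (l : List Int) (k : Nat) (v : Int) (h1 : 0 < k) (h2 : k ≤ l.length) :
    PySem.List.pySetD l (-(k : Int)) v = l.set (l.length - k) v := by
  simp only [PySem.List.pySetD, PySem.List.pySet?, PySem.List.pyIdx?]
  rw [if_neg (by omega), if_pos (by omega)]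
  simp

theorem pv_pyGetD_neg (l : List Int) (k : Nat) (h1 : 0 < k) (h2 : k ≤ l.length) :
    PySem.List.pyGetD l (-(k : Int)) 0 = l.getD (l.length - k) 0 := by
  rw [PySem.List.pyGetD_neg_natCast l k 0 h1 h2]
  exact (List.getD_eq_getElem l 0 (by omega)).symm

theorem pv_length_pySwapA (l : List Int) (i j : Int) : (pySwapA l i j).length = l.length := by
  simp [pySwapA, PySem.List.length_pySetD]

-- effect of the first loop's swap arr[i] ↔ arr[i - q] (negative index), pointwise
theorem pv_swap1_getD (l : List Int) (n q i : Nat) (hn : l.length = n) (h3 : 3 * q ≤ n)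
    (hi : i < q) (x : Nat) :
    (pySwapA l (i : Int) ((i : Int) - (q : Int))).getD x 0 =
      if x = n - q + i then l.getD i 0
      else if x = i then l.getD (n - q + i) 0
      else l.getD x 0 := by
  have hneg : (i : Int) - (q : Int) = -((q - i : Nat) : Int) := by
    push_cast [Nat.cast_sub hi.le]; ring
  have hqi1 : 0 < q - i := by omega
  have hqi2 : q - i ≤ l.length := by omega
  simp only [pySwapA, hneg]
  rw [pv_pyGetD_neg l (q - i) hqi1 hqi2]
  rw [PySem.List.pyGetD_natCast]
  rw [PySem.List.pySetD_of_nonneg l _ (Int.natCast_nonneg i)]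
  rw [Int.toNat_natCast]
  rw [pv_pySetD_neg _ (q - i) _ hqi1 (by rw [List.length_set]; omega)]
  simp only [pv_getD_set, List.length_set, hn]
  have hlen : n - (q - i) = n - q + i := by omega
  rw [hlen]
  split_ifs <;> first | rfl | omega | (congr 1; omega)

-- effect of the second loop's swap arr[k] ↔ arr[q + k], pointwise
theorem pv_swap2_getD (l : List Int) (n q k : Nat) (hn : l.length = n) (h3 : 3 * q ≤ n)
    (hk : k < q) (x : Nat) :
    (pySwapA l (k : Int) ((q : Int) + (k : Int))).getD x 0 =
      if x = q + k then l.getD k 0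
      else if x = k then l.getD (q + k) 0
      else l.getD x 0 := by
  have hcast : (q : Int) + (k : Int) = ((q + k : Nat) : Int) := by push_cast; ring
  simp only [pySwapA, hcast]
  rw [PySem.List.pyGetD_natCast, PySem.List.pyGetD_natCast]
  rw [PySem.List.pySetD_of_nonneg l _ (Int.natCast_nonneg k)]
  rw [PySem.List.pySetD_of_nonneg _ _ (Int.natCast_nonneg (q + k))]
  rw [Int.toNat_natCast, Int.toNat_natCast]
  simp only [pv_getD_set, List.length_set, hn]
  split_ifs <;> first | rfl | omega | (congr 1; omega)

-- invariant of the first loop: positions i..q-1 and n-q+i..n-1 get exchanged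
theorem pv_loop1_char (n q : Nat) (h3 : 3 * q ≤ n) :
    ∀ (c : Nat) (l : List Int) (i : Nat), l.length = n → i + c = q →
      (psLoop1 l (q : Int) (i : Int) ((i : Int) - (q : Int))).length = n ∧
      ∀ x, (psLoop1 l (q : Int) (i : Int) ((i : Int) - (q : Int))).getD x 0 =
        if i ≤ x ∧ x < q then l.getD (n - q + x) 0
        else if n - q + i ≤ x ∧ x < n then l.getD (x - (n - q)) 0
        else l.getD x 0 := by
  intro c
  induction c with
  | zero =>
    intro l i hl hiq
    rw [psLoop1, if_neg (by omega)]
    refine ⟨hl, fun x => ?_⟩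
    split_ifs <;> first | rfl | omega
  | succ c ih =>
    intro l i hl hiq
    have hi : i < q := by omega
    rw [psLoop1, if_pos (by exact_mod_cast hi)]
    have hstep1 : ((i : Int) + 1) = ((i + 1 : Nat) : Int) := by push_cast; ring
    have hstep2 : ((i : Int) - (q : Int) + 1) = ((i + 1 : Nat) : Int) - (q : Int) := by
      push_cast; ring
    rw [hstep1, hstep2]
    have hl' : (pySwapA l (i : Int) ((i : Int) - (q : Int))).length = n := by
      rw [pv_length_pySwapA]; exact hl
    obtain ⟨hlen, hget⟩ := ih (pySwapA l (i : Int) ((i : Int) - (q : Int))) (i + 1) hl' (by omega)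
    refine ⟨hlen, fun x => ?_⟩
    rw [hget x]
    rw [pv_swap1_getD l n q i hl h3 hi, pv_swap1_getD l n q i hl h3 hi,
      pv_swap1_getD l n q i hl h3 hi]
    split_ifs <;> first | rfl | omega | (congr 1; omega)

-- invariant of the second loop: positions k..q-1 and q+k..2q-1 get exchanged
theorem pv_loop2_char (n q : Nat) (h3 : 3 * q ≤ n) :
    ∀ (c : Nat) (l : List Int) (k : Nat), l.length = n → k + c = q →
      (psLoop2 l (q : Int) (k : Int)).length = n ∧
      ∀ x, (psLoop2 l (q : Int) (k : Int)).getD x 0 =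
        if k ≤ x ∧ x < q then l.getD (q + x) 0
        else if q + k ≤ x ∧ x < 2 * q then l.getD (x - q) 0
        else l.getD x 0 := by
  intro c
  induction c with
  | zero =>
    intro l k hl hkq
    rw [psLoop2, if_neg (by omega)]
    refine ⟨hl, fun x => ?_⟩
    split_ifs <;> first | rfl | omega
  | succ c ih =>
    intro l k hl hkq
    have hk : k < q := by omega
    rw [psLoop2, if_pos (by exact_mod_cast hk)]
    have hstep1 : ((k : Int) + 1) = ((k + 1 : Nat) : Int) := by push_cast; ring
    rw [hstep1]
    have hl' : (pySwapA l (k : Int) ((q : Int) + (k : Int))).length = n := by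
      rw [pv_length_pySwapA]; exact hl
    obtain ⟨hlen, hget⟩ := ih (pySwapA l (k : Int) ((q : Int) + (k : Int))) (k + 1) hl' (by omega)
    refine ⟨hlen, fun x => ?_⟩
    rw [hget x]
    rw [pv_swap2_getD l n q k hl h3 hk, pv_swap2_getD l n q k hl h3 hk,
      pv_swap2_getD l n q k hl h3 hk]
    split_ifs <;> first | rfl | omega | (congr 1; omega)

-- two lists of the same length agreeing under getD are equal
theorem pv_ext (l1 l2 : List Int) (n : Nat) (h1 : l1.length = n) (h2 : l2.length = n)
    (h : ∀ x, x < n → l1.getD x 0 = l2.getD x 0) : l1 = l2 := by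
  apply List.ext_getElem (by omega)
  intro i hi1 hi2
  have := h i (by omega)
  rwa [List.getD_eq_getElem l1 0 hi1, List.getD_eq_getElem l2 0 hi2] at this

theorem prefix_suffix_swap_spec_aux (arr : List Int) :
    prefix_suffix_swap arr = prefix_suffix_swap_alt arr := by
  set n := arr.length with hn
  set q := n / 3 with hq
  have h3 : 3 * q ≤ n := by omega
  have hfd : PySem.Int.floordiv (n : Int) 3 = (q : Int) := by
    exact_mod_cast PySem.Int.floordiv_natCast n 3
  have hA : prefix_suffix_swap arr =
      psLoop2 (psLoop1 arr (q : Int) ((0 : Nat) : Int) (((0 : Nat) : Int) - (q : Int))) (q : Int) ((0 : Nat) : Int) := by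
    simp only [prefix_suffix_swap, ← hn, hfd]
    norm_num
  have hB : prefix_suffix_swap_alt arr =
      (arr.drop q).take q ++ arr.drop (n - q) ++ (arr.drop (2 * q)).take (n - q - 2 * q) ++ arr.take q := by
    simp only [prefix_suffix_swap_alt, ← hn, hfd]
    have h2q : (2 : Int) * (q : Int) = ((2 * q : Nat) : Int) := by push_cast; ring
    have hnq : (n : Int) - (q : Int) = ((n - q : Nat) : Int) := by
      push_cast [Nat.cast_sub (by omega : q ≤ n)]; ring
    rw [h2q, hnq, PySem.List.slice_natCast, PySem.List.slice_natCast,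
      PySem.List.slice_from_natCast, PySem.List.slice_to_natCast]
    rw [show 2 * q - q = q from by omega]
  obtain ⟨hlen1, hget1⟩ := pv_loop1_char n q h3 q arr 0 hn.symm (by omega)
  obtain ⟨hlen2, hget2⟩ := pv_loop2_char n q h3 q _ 0 hlen1 (by omega)
  rw [hA, hB]
  have hlenB : ((arr.drop q).take q ++ arr.drop (n - q) ++ (arr.drop (2 * q)).take (n - q - 2 * q) ++ arr.take q).length = n := by
    simp [List.length_take, List.length_drop, ← hn]
    omega
  apply pv_ext _ _ n hlen2 hlenB
  intro x hx
  rw [hget2 x]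
  have m1 : min q (n - q) = q := by omega
  have m2 : min (n - q - 2 * q) (n - 2 * q) = n - q - 2 * q := by omega
  have m3 : n - (n - q) = q := by omega
  rcases (by omega : x < q ∨ (q ≤ x ∧ x < 2 * q) ∨ (2 * q ≤ x ∧ x < n - q) ∨ (n - q ≤ x ∧ x < n)) with h | h | h | h
  · rw [if_pos (show 0 ≤ x ∧ x < q by omega), hget1 (q + x),
      if_neg (by omega), if_neg (by omega)]
    simp only [List.getD_eq_getElem?_getD, List.getElem?_append, List.getElem?_take,
      List.getElem?_drop, List.length_append, List.length_take, List.length_drop, ← hn, m1, m2, m3]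
    rw [if_pos (by omega), if_pos (by omega), if_pos (by omega), if_pos (by omega)]
  · rw [if_neg (by omega), if_pos (show q + 0 ≤ x ∧ x < 2 * q by omega), hget1 (x - q),
      if_pos (by omega)]
    simp only [List.getD_eq_getElem?_getD, List.getElem?_append, List.getElem?_take,
      List.getElem?_drop, List.length_append, List.length_take, List.length_drop, ← hn, m1, m2, m3]
    rw [if_pos (by omega), if_pos (by omega), if_neg (by omega)]
  · rw [if_neg (by omega), if_neg (by omega), hget1 x,
      if_neg (by omega), if_neg (by omega)]
    simp only [List.getD_eq_getElem?_getD, List.getElem?_append, List.getElem?_take,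
      List.getElem?_drop, List.length_append, List.length_take, List.length_drop, ← hn, m1, m2, m3]
    rw [if_pos (by omega), if_neg (by omega), if_pos (by omega)]
    congr 2
    omega
  · rw [if_neg (by omega), if_neg (by omega), hget1 x,
      if_neg (by omega), if_pos (by omega)]
    simp only [List.getD_eq_getElem?_getD, List.getElem?_append, List.getElem?_take,
      List.getElem?_drop, List.length_append, List.length_take, List.length_drop, ← hn, m1, m2, m3]
    rw [if_neg (by omega), if_pos (by omega)]
    congr 2
    omega

-- ===== VERDICT (by name: the statement is the Claim_ definition above) =====
theorem prefix_suffix_swap_spec : Claim_equal_prefix_suffix_swap := by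
  intro arr _
  exact prefix_suffix_swap_spec_aux arr
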